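-- pv_equiv track=rewrite | github.com/SrushtiKamble25/pythonproject | q3.py | process_maintenance_queries
-- ===== SOURCE A (Python) =====
-- from bisect import bisect_left, bisect_right
--
-- class FenwickTree:
--     def __init__(self, size):
--         self.size = size
--         self.tree = [0] * (size + 1)
--
--     def add(self, index, value):
--         while index <= self.size:
--             self.tree[index] += value
--             index += index & -index
--
--     def get_prefix_sum(self, index):
--         total = 0
--         while index > 0:
--             total += self.tree[index]
--             index -= index & -index
--         return total
--
--     def get_range_sum(self, left, right):
--         return self.get_prefix_sum(right) - self.get_prefix_sum(left - 1)
--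
-- def process_maintenance_queries(logs, queries):
--     # Extract unique dates and map them to indices
--     sorted_dates = sorted(set(date for _, date, _ in logs))
--     date_index_map = {date: idx + 1 for idx, date in enumerate(sorted_dates)}
--
--     # Initialize Fenwick Tree
--     fenwick_tree = FenwickTree(len(sorted_dates))
--
--     # Populate tree with maintenance costs
--     for _, date, cost in logs:
--         fenwick_tree.add(date_index_map[date], cost)
--
--     # Process range sum queries
--     results = []
--     for start, end in queries:
--         left_idx = bisect_left(sorted_dates, start) + 1
--         right_idx = bisect_right(sorted_dates, end)
--
--         # If no valid range found, return 0
--         if left_idx > len(sorted_dates) or sorted_dates[left_idx - 1] > end: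
--             results.append(0)
--         else:
--             results.append(fenwick_tree.get_range_sum(left_idx, right_idx))
--
--     return results
-- ===== SOURCE B (Python) =====
-- from bisect import bisect_left, bisect_right
--
-- def process_maintenance_queries(logs, queries):
--     # Prefix-sum array over the sorted distinct dates instead of a Fenwick tree.
--     sorted_dates = sorted(set(date for _, date, _ in logs))
--     cost_at = {}
--     for _, date, cost in logs:
--         cost_at[date] = cost_at.get(date, 0) + cost
--     prefix = [0]
--     for date in sorted_dates:
--         prefix.append(prefix[-1] + cost_at[date])
--     results = []
--     for start, end in queries:
--         left_idx = bisect_left(sorted_dates, start) + 1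
--         right_idx = bisect_right(sorted_dates, end)
--         if left_idx > len(sorted_dates) or sorted_dates[left_idx - 1] > end:
--             results.append(0)
--         else:
--             results.append(prefix[right_idx] - prefix[left_idx - 1])
--     return results
-- ===== Notes on version B (the rewrite author's own statement) =====
-- stated objective: simpler
-- what changed: Replaced the Fenwick (binary indexed) tree and its bit-trick update/query loops by a per-date cost dictionary and a plain prefix-sum array over the sorted distinct dates; the query loop is unchanged.
import Mathlib
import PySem

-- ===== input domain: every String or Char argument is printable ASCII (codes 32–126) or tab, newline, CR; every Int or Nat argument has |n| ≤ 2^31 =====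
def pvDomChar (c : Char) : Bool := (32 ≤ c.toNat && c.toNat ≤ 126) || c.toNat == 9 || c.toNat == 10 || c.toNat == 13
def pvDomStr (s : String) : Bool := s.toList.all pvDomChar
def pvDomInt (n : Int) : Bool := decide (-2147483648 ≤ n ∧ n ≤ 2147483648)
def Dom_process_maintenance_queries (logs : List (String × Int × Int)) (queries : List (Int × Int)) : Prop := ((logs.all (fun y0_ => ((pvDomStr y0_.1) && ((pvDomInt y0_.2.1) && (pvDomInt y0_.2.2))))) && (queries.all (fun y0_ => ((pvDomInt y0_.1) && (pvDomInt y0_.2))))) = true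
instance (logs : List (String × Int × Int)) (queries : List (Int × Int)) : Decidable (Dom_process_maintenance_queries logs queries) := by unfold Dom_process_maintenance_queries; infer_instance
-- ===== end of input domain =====

-- B replaces A's Fenwick (binary indexed) tree by a per-date cost dictionary and a plain
-- prefix-sum array over the sorted distinct dates (simpler); the query loop is unchanged.

-- ===== PORT A =====

-- Python's `index & -index` (lowest set bit of the positive index), rendered on Nat as
-- index - (index & (index - 1)); exact for every index >= 1, and A only reaches it with index >= 1.
def pyLowbit (i : Nat) : Nat := i - (i &&& (i - 1))

-- needed by the ports' termination proofs, so it stays above them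
theorem pyLowbit_pos {i : Nat} (h : 0 < i) : 0 < pyLowbit i := by
  have h2 : i &&& (i - 1) <= i - 1 := Nat.and_le_right
  unfold pyLowbit; omega

-- FenwickTree.add: `while index <= self.size: tree[index] += value; index += index & -index`.
-- The `0 < index` conjunct only makes the recursion total (A never calls add with index = 0);
-- tree[index] is always in range there, so List.getD/List.set are exact.
def fenAdd (size : Nat) (tree : List Int) (index : Nat) (value : Int) : List Int :=
  if h : index <= size ∧ 0 < index then
    fenAdd size (tree.set index (tree.getD index 0 + value)) (index + pyLowbit index) value
  else tree
termination_by size + 1 - index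
decreasing_by have := pyLowbit_pos h.2; omega

-- FenwickTree.get_prefix_sum: `while index > 0: total += tree[index]; index -= index & -index`.
def fenSum (tree : List Int) (index : Nat) (total : Int) : Int :=
  if h : 0 < index then fenSum tree (index - pyLowbit index) (total + tree.getD index 0)
  else total
termination_by index
decreasing_by have := pyLowbit_pos h; omega

-- sorted_dates[left_idx - 1] is reached only with 1 <= left_idx <= len, so getD is exact;
-- the dict value date_index_map[date] is 1..size, so .toNat is exact.
def process_maintenance_queries (logs : List (String × Int × Int)) (queries : List (Int × Int)) : List Int :=
  let sorted_dates := PySem.List.sorted (PySem.Set.ofList (logs.map (fun l => l.2.1))) (fun d => d)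
  let date_index_map : PySem.Dict Int Int :=
    (PySem.List.enumerate sorted_dates).foldl (fun d p => d.insert p.2 (p.1 + 1)) PySem.Dict.empty
  let size := sorted_dates.length
  let tree := logs.foldl (fun t l => fenAdd size t (date_index_map.getD l.2.1 0).toNat l.2.2)
                (List.replicate (size + 1) 0)
  queries.foldl (fun results q =>
    let left_idx := PySem.List.bisectLeft sorted_dates q.1 + 1
    let right_idx := PySem.List.bisectRight sorted_dates q.2
    if size < left_idx then results ++ [0]
    else if q.2 < sorted_dates.getD (left_idx - 1) 0 then results ++ [0]
    else results ++ [fenSum tree right_idx 0 - fenSum tree (left_idx - 1) 0]) []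
-- ===== PORT B =====

-- cost_at[date] lookups always hit a key; prefix[-1] is getLastD on a never-empty list: both exact.
def process_maintenance_queries_alt (logs : List (String × Int × Int)) (queries : List (Int × Int)) : List Int :=
  let sorted_dates := PySem.List.sorted (PySem.Set.ofList (logs.map (fun l => l.2.1))) (fun d => d)
  let cost_at : PySem.Dict Int Int :=
    logs.foldl (fun d l => d.insert l.2.1 (d.getD l.2.1 0 + l.2.2)) PySem.Dict.empty
  let prefixs := sorted_dates.foldl (fun p d => p ++ [p.getLastD 0 + cost_at.getD d 0]) [0]
  queries.foldl (fun results q =>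
    let left_idx := PySem.List.bisectLeft sorted_dates q.1 + 1
    let right_idx := PySem.List.bisectRight sorted_dates q.2
    if sorted_dates.length < left_idx then results ++ [0]
    else if q.2 < sorted_dates.getD (left_idx - 1) 0 then results ++ [0]
    else results ++ [prefixs.getD right_idx 0 - prefixs.getD (left_idx - 1) 0]) []

-- ===== PRECONDITION & SPEC =====
def Spec_process_maintenance_queries (logs : List (String × Int × Int)) (queries : List (Int × Int)) (out : List Int) : Prop := out = process_maintenance_queries_alt logs queries
instance (logs : List (String × Int × Int)) (queries : List (Int × Int)) (out : List Int) : Decidable (Spec_process_maintenance_queries logs queries out) := by unfold Spec_process_maintenance_queries; infer_instance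

-- ===== CLAIM (what is proved, stated in full; the proofs are below) =====
def Claim_equal_process_maintenance_queries : Prop := ∀ (logs : List (String × Int × Int)) (queries : List (Int × Int)), Dom_process_maintenance_queries logs queries → Spec_process_maintenance_queries logs queries (process_maintenance_queries logs queries)

-- ===== LEMMAS AND PROOFS =====


theorem land_oe (a b : Nat) : (2*a+1) &&& (2*b) = 2*(a &&& b) := by
  apply Nat.eq_of_testBit_eq
  intro i
  cases i with
  | zero => simp [Nat.testBit_zero]
  | succ i =>
    rw [Nat.testBit_land]
    simp only [Nat.testBit_succ]
    rw [show (2*a+1)/2 = a from by omega, show (2*b)/2 = b from by omega,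
        show (2*(a &&& b))/2 = a &&& b from by omega]
    exact (Nat.testBit_land a b i).symm

theorem land_eo (a b : Nat) : (2*a) &&& (2*b+1) = 2*(a &&& b) := by
  apply Nat.eq_of_testBit_eq
  intro i
  cases i with
  | zero => simp [Nat.testBit_zero]
  | succ i =>
    rw [Nat.testBit_land]
    simp only [Nat.testBit_succ]
    rw [show (2*a)/2 = a from by omega, show (2*b+1)/2 = b from by omega,
        show (2*(a &&& b))/2 = a &&& b from by omega]
    exact (Nat.testBit_land a b i).symm

theorem land_pred_pow (a m : Nat) : (2^a*(2*m+1)) &&& (2^a*(2*m+1) - 1) = 2^a*(2*m) := by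
  induction a with
  | zero =>
    simpa using (land_oe m m).trans (by rw [Nat.and_self])
  | succ a ih =>
    have hpos : 0 < 2^a*(2*m+1) := by positivity
    have h1 : 2^(a+1)*(2*m+1) = 2*(2^a*(2*m+1)) := by ring
    have h2 : 2^(a+1)*(2*m+1) - 1 = 2*((2^a*(2*m+1)) - 1) + 1 := by omega
    rw [h2, h1, land_eo, ih]
    ring
theorem pyLowbit_pow (a m : Nat) : pyLowbit (2^a*(2*m+1)) = 2^a := by
  unfold pyLowbit
  rw [land_pred_pow]
  rw [← Nat.mul_sub]
  simp

theorem exists_pow_odd {n : Nat} (h : 0 < n) : ∃ a m, n = 2^a*(2*m+1) := by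
  obtain ⟨k, m, hm, hn⟩ := Nat.exists_eq_two_pow_mul_odd (n := n) (by omega)
  obtain ⟨j, hj⟩ := hm
  exact ⟨k, j, by rw [hn, hj]⟩

theorem pyLowbit_le (i : Nat) : pyLowbit i ≤ i := Nat.sub_le _ _

theorem pyLowbit_add_high {s x r : Nat} (hr : 0 < r) (hlt : r < 2^s) :
    pyLowbit (2^s*x + r) = pyLowbit r := by
  obtain ⟨a, m, hm⟩ := exists_pow_odd hr
  have ha : a < s := by
    have h1 : 2^a ≤ r := by calc 2^a ≤ 2^a*(2*m+1) := Nat.le_mul_of_pos_right _ (by omega)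
                                _ = r := hm.symm
    exact (Nat.pow_lt_pow_iff_right (by omega)).mp (lt_of_le_of_lt h1 hlt)
  obtain ⟨u, hu⟩ : ∃ u, s = a + 1 + u := ⟨s - a - 1, by omega⟩
  subst hu
  have key : 2^(a+1+u)*x + r = 2^a*(2*(2^u*x + m) + 1) := by rw [hm]; ring
  rw [key, hm, pyLowbit_pow, pyLowbit_pow]

theorem lowbit_decomp {n : Nat} (h : 0 < n) :
    ∃ a m, n = 2^a*(2*m+1) ∧ pyLowbit n = 2^a ∧ n - pyLowbit n = 2^(a+1)*m := by
  obtain ⟨a, m, hm⟩ := exists_pow_odd h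
  refine ⟨a, m, hm, by rw [hm]; exact pyLowbit_pow a m, ?_⟩
  have h1 : pyLowbit n = 2^a := by rw [hm]; exact pyLowbit_pow a m
  have h2 : 2^a*(2*m+1) = 2^(a+1)*m + 2^a := by ring
  omega

theorem fenK1 {i j : Nat} (hi : 0 < i) (h1 : i - pyLowbit i < j) (h2 : j < i) :
    j + pyLowbit j ≤ i := by
  obtain ⟨b, m, hb, hlbi, hisub⟩ := lowbit_decomp hi
  set r := j - 2^(b+1)*m with hrdef
  have hrpos : 0 < r := by omega
  have hib : i = 2^(b+1)*m + 2^b := by rw [hb]; ring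
  have hrlt : r < 2^b := by omega
  have hj : j = 2^(b+1)*m + r := by omega
  have hlbj : pyLowbit j = pyLowbit r := by
    rw [hj]
    exact pyLowbit_add_high hrpos (lt_of_lt_of_le hrlt (Nat.pow_le_pow_right (by omega) (by omega)))
  obtain ⟨c, t, hc, hlbr, _⟩ := lowbit_decomp hrpos
  have hcb : c < b := by
    have hx : 2^c ≤ r := by calc 2^c ≤ 2^c*(2*t+1) := Nat.le_mul_of_pos_right _ (by omega)
                                _ = r := hc.symm
    exact (Nat.pow_lt_pow_iff_right (by omega)).mp (lt_of_le_of_lt hx hrlt)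
  have hstep : r + 2^c ≤ 2^b := by
    have hbc : 2^b = 2^c * 2^(b-c) := by rw [← Nat.pow_add]; congr 1; omega
    have hdvd : 2*t+1 < 2^(b-c) := by
      have hy := hrlt
      rw [hc, hbc] at hy
      exact Nat.lt_of_mul_lt_mul_left hy
    calc r + 2^c = 2^c*((2*t+1)+1) := by rw [hc]; ring
      _ ≤ 2^c*2^(b-c) := Nat.mul_le_mul_left _ (by omega)
      _ = 2^b := by rw [← Nat.pow_add]; congr 1; omega
  omega

theorem fenK2 {j k : Nat} (hj : 0 < j) (hk : j + pyLowbit j ≤ k)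
    (h : k - pyLowbit k < j + pyLowbit j) : k - pyLowbit k < j := by
  obtain ⟨a, m, ha, hlbj, _⟩ := lowbit_decomp hj
  have hkpos : 0 < k := by omega
  obtain ⟨b, mk, hbk, hlbk, hksub⟩ := lowbit_decomp hkpos
  by_contra hcon
  push_neg at hcon
  rw [hksub] at hcon h
  rw [hlbj] at h hk
  rcases le_or_gt a b with hab | hab
  · have hd1 : 2^a ∣ 2^(b+1)*mk := Dvd.dvd.mul_right (Nat.pow_dvd_pow 2 (by omega)) mk
    have hd2 : 2^a ∣ j := by rw [ha]; exact Dvd.intro _ rfl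
    have hpa : 0 < 2^a := Nat.two_pow_pos a
    obtain ⟨u, hu⟩ := hd1
    obtain ⟨v, hv⟩ := hd2
    rw [hu, hv] at hcon h
    have hvu : v ≤ u := Nat.le_of_mul_le_mul_left hcon hpa
    have huv1 : u < v + 1 := by
      apply Nat.lt_of_mul_lt_mul_left (a := 2^a)
      have : 2^a*(v+1) = 2^a*v + 2^a := by ring
      omega
    have huv : u = v := by omega
    have heq : 2^(b+1)*mk = j := by rw [hu, hv, huv]
    have hmk : 0 < mk := by
      rcases Nat.eq_zero_or_pos mk with h0 | h0
      · rw [h0, Nat.mul_zero] at heq; omega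
      · exact h0
    have hdd : 2^(a+1) ∣ 2^(b+1)*mk := Dvd.dvd.mul_right (Nat.pow_dvd_pow 2 (by omega)) mk
    rw [heq, ha] at hdd
    obtain ⟨w, hw⟩ := hdd
    have hw2 : 2^a*(2*m+1) = 2^a*(2*w) := by rw [hw]; ring
    have : 2*m+1 = 2*w := Nat.eq_of_mul_eq_mul_left hpa hw2
    omega
  · have hX : 2^(b+1) ∣ j + 2^a := by
      have hx : j + 2^a = 2^(a+1)*(m+1) := by rw [ha]; ring
      rw [hx]
      exact Dvd.dvd.mul_right (Nat.pow_dvd_pow 2 (by omega)) _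
    obtain ⟨T, hT⟩ := hX
    have hk2 : k = 2^(b+1)*mk + 2^b := by rw [hbk]; ring
    have hklt : k < j + 2^a + 2^b := by omega
    have hkge : j + 2^a ≤ k := hk
    rw [hT, hk2] at hklt hkge
    have hTmk : T ≤ mk := by
      by_contra hc; push_neg at hc
      have h5 : 2^(b+1)*(mk+1) ≤ 2^(b+1)*T := Nat.mul_le_mul_left _ hc
      have h6 : 2^(b+1)*(mk+1) = 2^(b+1)*mk + 2^b + 2^b := by ring
      omega
    have h7 : 2^(b+1)*T ≤ 2^(b+1)*mk := Nat.mul_le_mul_left _ hTmk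
    omega

def addPath (size j : Nat) : List Nat :=
  if h : 0 < j ∧ j ≤ size then j :: addPath size (j + pyLowbit j) else []
termination_by size + 1 - j
decreasing_by have := pyLowbit_pos h.1; omega

def qPath (i : Nat) : List Nat :=
  if h : 0 < i then i :: qPath (i - pyLowbit i) else []
termination_by i
decreasing_by have := pyLowbit_pos h; omega

theorem addPath_eq_cons {size j : Nat} (h1 : 0 < j) (h2 : j ≤ size) :
    addPath size j = j :: addPath size (j + pyLowbit j) := by
  rw [addPath]; simp [h1, h2]
theorem qPath_eq_nil : qPath 0 = [] := by rw [qPath]; simp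
theorem qPath_eq_cons {i : Nat} (h : 0 < i) : qPath i = i :: qPath (i - pyLowbit i) := by
  rw [qPath]; simp [h]

theorem mem_addPath_bounds {size j k : Nat} (h : k ∈ addPath size j) :
    j ≤ k ∧ k ≤ size ∧ 0 < k := by
  fun_induction addPath size j with
  | case1 j hj ih =>
    rcases List.mem_cons.mp h with rfl | hmem
    · exact ⟨le_refl _, hj.2, hj.1⟩
    · have := ih hmem
      have := pyLowbit_pos hj.1
      omega
  | case2 j hj => simp at h

theorem mem_addPath_inv {size j k : Nat} (hj : 0 < j) (h : k ∈ addPath size j) :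
    k - pyLowbit k < j := by
  fun_induction addPath size j with
  | case1 j hj2 ih =>
    rcases List.mem_cons.mp h with rfl | hmem
    · have := pyLowbit_pos hj2.1; omega
    · have hb := mem_addPath_bounds hmem
      have hlt := ih (by have := pyLowbit_pos hj2.1; omega) hmem
      exact fenK2 hj2.1 hb.1 hlt
  | case2 j hj2 => simp at h

theorem mem_addPath_of {size : Nat} : ∀ (n i j : Nat), i - j ≤ n → 0 < j →
    i - pyLowbit i < j → j ≤ i → i ≤ size → i ∈ addPath size j := by
  intro n
  induction n with
  | zero =>
    intro i j hn hj h1 h2 h3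
    have : i = j := by omega
    subst this
    rw [addPath_eq_cons hj h3]
    exact List.mem_cons_self
  | succ n ih =>
    intro i j hn hj h1 h2 h3
    rcases Nat.eq_or_lt_of_le h2 with rfl | hlt
    · rw [addPath_eq_cons hj h3]
      exact List.mem_cons_self
    · have hstep : j + pyLowbit j ≤ i := fenK1 (by omega) h1 hlt
      have hlbj := pyLowbit_pos hj
      rw [addPath_eq_cons hj (by omega)]
      apply List.mem_cons_of_mem
      exact ih i (j + pyLowbit j) (by omega) (by omega) (by omega) hstep h3

theorem qPath_countP {size : Nat} : ∀ i, i ≤ size → ∀ j, 0 < j →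
    ((qPath i).countP (fun k => decide (k ∈ addPath size j))) = if j ≤ i then 1 else 0 := by
  intro i
  induction i using Nat.strong_induction_on with
  | _ i ihs =>
    intro hi j hj
    rcases Nat.eq_zero_or_pos i with rfl | hipos
    · rw [qPath_eq_nil]; simp; omega
    · rw [qPath_eq_cons hipos]
      rw [List.countP_cons]
      have hlb := pyLowbit_pos hipos
      have hlble := pyLowbit_le i
      set i' := i - pyLowbit i with hi'
      have hi'lt : i' < i := by omega
      rw [ihs i' hi'lt (by omega) j hj]
      by_cases hcase1 : i < j
      · -- j > i: both zero
        have hnotmem : ¬(i ∈ addPath size j) := by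
          intro hmem
          have := mem_addPath_bounds hmem
          omega
        simp [hnotmem]
        split_ifs <;> omega
      · push_neg at hcase1   -- j ≤ i
        by_cases hcase2 : j ≤ i'
        · have hnotmem : ¬(i ∈ addPath size j) := by
            intro hmem
            have := mem_addPath_inv hj hmem
            omega
          simp [hnotmem]
          split_ifs <;> omega
        · push_neg at hcase2  -- i' < j ≤ i
          have hmem : i ∈ addPath size j := mem_addPath_of (i - j) i j (le_refl _) hj (by omega) hcase1 hi
          simp [hmem]
          split_ifs <;> omega

theorem fenAdd_length (size : Nat) (tree : List Int) (j : Nat) (v : Int) :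
    (fenAdd size tree j v).length = tree.length := by
  fun_induction fenAdd size tree j v with
  | case1 tree j h ih => rw [ih]; simp
  | case2 tree j h => rfl

theorem getD_set_self {l : List Int} {p : Nat} (h : p < l.length) (x : Int) :
    (l.set p x).getD p 0 = x := by
  simp [List.getD_eq_getElem?_getD, List.getElem?_set_self, h]

theorem getD_set_ne {l : List Int} {p k : Nat} (h : p ≠ k) (x : Int) :
    (l.set p x).getD k 0 = l.getD k 0 := by
  simp [List.getD_eq_getElem?_getD, List.getElem?_set_ne h]

theorem fenAdd_getD (size : Nat) (tree : List Int) (j : Nat) (v : Int)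
    (hlen : tree.length = size + 1) (k : Nat) :
    (fenAdd size tree j v).getD k 0
      = tree.getD k 0 + (if k ∈ addPath size j then v else 0) := by
  fun_induction fenAdd size tree j v with
  | case1 tree j h ih =>
    have hlen2 : (tree.set j (tree.getD j 0 + v)).length = size + 1 := by simp [hlen]
    rw [ih hlen2]
    rw [addPath_eq_cons h.2 h.1]
    by_cases hkj : k = j
    · subst hkj
      have hnot : ¬(k ∈ addPath size (k + pyLowbit k)) := by
        intro hmem
        have := mem_addPath_bounds hmem
        have := pyLowbit_pos h.2
        omega
      rw [getD_set_self (by omega)]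
      simp [hnot]
    · rw [getD_set_ne (fun he => hkj he.symm)]
      simp only [List.mem_cons]
      have : (k = j) = False := by simp [hkj]
      simp [hkj]
  | case2 tree j h =>
    rw [addPath]
    simp only [dite_eq_ite]
    have : ¬(0 < j ∧ j ≤ size) := by omega
    simp [this]

theorem fenSum_eq (tree : List Int) (i : Nat) (total : Int) :
    fenSum tree i total = total + ((qPath i).map (fun k => tree.getD k 0)).sum := by
  fun_induction fenSum tree i total with
  | case1 i total h ih =>
    rw [ih, qPath_eq_cons h, List.map_cons, List.sum_cons]
    ring
  | case2 i total h =>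
    rw [qPath, dif_neg h]
    simp

theorem sum_map_indicator (l : List Nat) (P : Nat → Prop) [DecidablePred P] (v : Int) :
    (l.map (fun k => if P k then v else 0)).sum = v * (l.countP (fun k => decide (P k))) := by
  induction l with
  | nil => simp
  | cons x xs ih =>
    rw [List.map_cons, List.sum_cons, ih, List.countP_cons]
    by_cases h : P x <;> simp [h] <;> ring

theorem fenSum_fenAdd (size : Nat) (tree : List Int) (j : Nat) (v : Int) (i : Nat)
    (hlen : tree.length = size + 1) (hj : 0 < j) (hi : i ≤ size) :
    fenSum (fenAdd size tree j v) i 0 = fenSum tree i 0 + (if j ≤ i then v else 0) := by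
  rw [fenSum_eq, fenSum_eq]
  have hmap : (qPath i).map (fun k => (fenAdd size tree j v).getD k 0)
      = (qPath i).map (fun k => tree.getD k 0 + (if k ∈ addPath size j then v else 0)) := by
    apply List.map_congr_left
    intro k _
    exact fenAdd_getD size tree j v hlen k
  rw [hmap, PySem.List.sum_map_add_int]
  rw [sum_map_indicator _ (fun k => k ∈ addPath size j) v]
  rw [qPath_countP i hi j hj]
  split_ifs with hji
  · push_cast; ring
  · push_cast; ring

theorem getD_replicate (n k : Nat) : (List.replicate n (0:Int)).getD k 0 = 0 := by
  simp [List.getD_eq_getElem?_getD]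

theorem fenSum_replicate (size i : Nat) : fenSum (List.replicate (size+1) (0:Int)) i 0 = 0 := by
  rw [fenSum_eq]
  have : ∀ k ∈ qPath i, (List.replicate (size+1) (0:Int)).getD k 0 = 0 := by
    intro k _; exact getD_replicate _ _
  rw [List.map_congr_left (g := fun _ => (0:Int)) (fun k hk => this k hk)]
  simp

theorem fenBuild {α : Type} (size : Nat) (idx : α → Nat) (c : α → Int) (i : Nat) (hi : i ≤ size) :
    ∀ (ls : List α) (tree : List Int), tree.length = size + 1 →
    (∀ l ∈ ls, 0 < idx l) →
    fenSum (ls.foldl (fun t l => fenAdd size t (idx l) (c l)) tree) i 0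
      = fenSum tree i 0 + ((ls.map (fun l => if idx l ≤ i then c l else 0)).sum) := by
  intro ls
  induction ls with
  | nil => intro tree _ _; simp
  | cons x xs ih =>
    intro tree hlen hpos
    rw [List.foldl_cons]
    rw [ih _ (by rw [fenAdd_length]; exact hlen) (fun l hl => hpos l (List.mem_cons_of_mem _ hl))]
    rw [fenSum_fenAdd size tree (idx x) (c x) i hlen (hpos x List.mem_cons_self) hi]
    simp
    ring



theorem sorted_lt_of_set (dates : List Int) :
    (PySem.List.sorted (PySem.Set.ofList dates) (fun d => d)).Pairwise (· < ·) := by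
  have hperm : (PySem.List.sorted (PySem.Set.ofList dates) (fun d => d)).Perm (PySem.Set.ofList dates) :=
    PySem.List.sorted_perm _ _ _
  have hnd : (PySem.List.sorted (PySem.Set.ofList dates) (fun d => d)).Nodup :=
    hperm.nodup_iff.mpr (PySem.Set.nodup_ofList dates)
  have hle : (PySem.List.sorted (PySem.Set.ofList dates) (fun d => d)).Pairwise (· ≤ ·) :=
    PySem.List.sorted_pairwise _ _
  have := List.Pairwise.and hle hnd
  exact this.imp (fun h => lt_of_le_of_ne h.1 h.2)

theorem mem_sorted_set (dates : List Int) (x : Int) :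
    x ∈ PySem.List.sorted (PySem.Set.ofList dates) (fun d => d) ↔ x ∈ dates := by
  rw [(PySem.List.sorted_perm (PySem.Set.ofList dates) (fun d => d) false).mem_iff]
  exact PySem.Set.mem_ofList dates x

theorem bisectLeft_getElem (L : List Int) (hp : L.Pairwise (· < ·)) (k : Nat) (hk : k < L.length) :
    PySem.List.bisectLeft L L[k] = k := by
  have hple : L.Pairwise (· ≤ ·) := hp.imp le_of_lt
  obtain ⟨hle, hlt, hge⟩ := PySem.List.bisectLeft_spec L L[k] hple
  set J := PySem.List.bisectLeft L L[k] with hJ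
  rcases Nat.lt_trichotomy J k with h | h | h
  · have := hge J (by omega) (le_refl J)
    have h2 : L[J] < L[k] := List.pairwise_iff_getElem.mp hp J k (by omega) hk h
    omega
  · exact h
  · have := hlt k hk h
    omega

theorem dmap_getD (L : List Int) (hnd : L.Nodup) (t : Nat) (ht : t < L.length) :
    ((PySem.List.enumerate L).foldl (fun d p => d.insert p.2 (p.1 + 1)) PySem.Dict.empty).getD L[t] 0
      = (t : Int) + 1 := by
  have hitems := PySem.Dict.items_foldl_insert_fresh (PySem.List.enumerate L)
      (fun p => p.2) (fun p => p.1 + 1) PySem.Dict.empty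
      (by intro a _; simp [PySem.Dict.contains_empty])
      (by rw [PySem.List.map_snd_enumerate]; exact hnd)
  have hndk : ((PySem.List.enumerate L).foldl (fun d p => d.insert p.2 (p.1 + 1)) PySem.Dict.empty).keys.Nodup := by
    apply PySem.Dict.nodup_keys_foldl_insert_key (PySem.List.enumerate L) (fun p => p.2)
      (fun d p => p.1 + 1) PySem.Dict.empty
    exact PySem.Dict.nodup_keys_empty
  have hmem : ((t : Int), L[t]) ∈ PySem.List.enumerate L := by
    rw [PySem.List.mem_enumerate_iff]
    exact ⟨t, ht, by simp⟩
  have hmem2 : (L[t], (t : Int) + 1) ∈ ((PySem.List.enumerate L).foldl (fun d p => d.insert p.2 (p.1 + 1)) PySem.Dict.empty).items := by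
    rw [hitems]
    simp only [List.nil_append]
    exact List.mem_map.mpr ⟨((t : Int), L[t]), hmem, rfl⟩
  exact PySem.Dict.getD_of_mem_items _ hmem2 hndk 0

theorem costat_getD (logs : List (String × Int × Int)) (x : Int) :
    ∀ D : PySem.Dict Int Int,
    (logs.foldl (fun d l => d.insert l.2.1 (d.getD l.2.1 0 + l.2.2)) D).getD x 0
      = D.getD x 0 + ((logs.map (fun l => if l.2.1 = x then l.2.2 else 0)).sum) := by
  induction logs with
  | nil => intro D; simp
  | cons l ls ih =>
    intro D
    rw [List.foldl_cons, ih, PySem.Dict.getD_insert]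
    by_cases h : x = l.2.1
    · subst h; simp
      ring
    · have h' : l.2.1 ≠ x := fun hh => h hh.symm
      simp [h, h']

-- prefix list built by append-fold
def preList (g : Int → Int) : List Int → Int → List Int
  | [], _ => []
  | d :: ds, last => (last + g d) :: preList g ds (last + g d)

theorem foldl_pre (g : Int → Int) :
    ∀ (ds : List Int) (acc : List Int), acc ≠ [] →
    ds.foldl (fun p d => p ++ [p.getLastD 0 + g d]) acc = acc ++ preList g ds (acc.getLastD 0) := by
  intro ds
  induction ds with
  | nil => intro acc _; simp [preList]
  | cons d ds ih =>
    intro acc hacc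
    rw [List.foldl_cons, ih _ (by simp), preList]
    have hlast : (acc ++ [acc.getLastD 0 + g d]).getLastD 0 = acc.getLastD 0 + g d := by
      simp [List.getLastD_concat]
    rw [hlast]
    simp

theorem preList_getD (g : Int → Int) :
    ∀ (ds : List Int) (last : Int) (k : Nat), k < ds.length →
    (preList g ds last).getD k 0 = last + ((ds.take (k+1)).map g).sum := by
  intro ds
  induction ds with
  | nil => intro last k hk; simp at hk
  | cons d ds ih =>
    intro last k hk
    cases k with
    | zero => simp [preList]
    | succ k =>
      rw [preList]
      have : ((d :: ds).take (k+1+1)).map g = g d :: ((ds.take (k+1)).map g) := by simp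
      rw [this]
      simp only [List.getD_cons_succ, List.sum_cons]
      rw [ih (last + g d) k (by simpa using hk)]
      ring

theorem prefix_getD (g : Int → Int) (L : List Int) (t : Nat) (ht : t ≤ L.length) :
    (L.foldl (fun p d => p ++ [p.getLastD 0 + g d]) [0]).getD t 0 = ((L.take t).map g).sum := by
  rw [foldl_pre g L [0] (by simp)]
  have h0 : ([0] : List Int).getLastD 0 = 0 := rfl
  rw [h0]
  cases t with
  | zero => simp
  | succ t =>
    have h1 : ([(0:Int)] ++ preList g L 0).getD (t+1) 0 = (preList g L 0).getD t 0 := by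
      simp [List.getD_cons_succ]
    rw [h1, preList_getD g L 0 t (by omega)]
    simp



theorem exchange (L : List Int) (hp : L.Pairwise (· < ·)) (hnd : L.Nodup)
    (logs : List (String × Int × Int)) (hdates : ∀ l ∈ logs, l.2.1 ∈ L) :
    ∀ t, t ≤ L.length →
    ((L.take t).map (fun d => (logs.map (fun l => if l.2.1 = d then l.2.2 else 0)).sum)).sum
      = (logs.map (fun l => if PySem.List.bisectLeft L l.2.1 + 1 ≤ t then l.2.2 else 0)).sum := by
  intro t
  induction t with
  | zero =>
    intro _
    simp
  | succ t ih =>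
    intro ht
    have htl : t < L.length := by omega
    rw [List.take_succ_eq_append_getElem htl, List.map_append, List.sum_append]
    rw [ih (by omega)]
    have key : ∀ l ∈ logs,
        (if PySem.List.bisectLeft L l.2.1 + 1 ≤ t + 1 then l.2.2 else 0)
          = (if PySem.List.bisectLeft L l.2.1 + 1 ≤ t then l.2.2 else 0)
            + (if l.2.1 = L[t] then l.2.2 else 0) := by
      intro l hl
      obtain ⟨k, hk, hkl⟩ := List.mem_iff_getElem.mp (hdates l hl)
      have hJ : PySem.List.bisectLeft L l.2.1 = k := by rw [← hkl]; exact bisectLeft_getElem L hp k hk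
      rw [hJ]
      by_cases hkt : k = t
      · subst hkt
        have : l.2.1 = L[k] := hkl.symm
        simp [this]
      · have hne : l.2.1 ≠ L[t] := by
          rw [← hkl]
          intro he
          exact hkt ((List.Nodup.getElem_inj_iff hnd).mp he)
        simp only [hne, if_false]
        split_ifs <;> omega
    rw [List.map_congr_left key, PySem.List.sum_map_add_int]
    simp [List.map_cons]

theorem aside (logs : List (String × Int × Int)) (t : Nat)
    (ht : t ≤ (PySem.List.sorted (PySem.Set.ofList (logs.map (fun l => l.2.1))) (fun d => d)).length) :
    fenSum (logs.foldl (fun tr l =>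
        fenAdd (PySem.List.sorted (PySem.Set.ofList (logs.map (fun l => l.2.1))) (fun d => d)).length tr
          (((PySem.List.enumerate (PySem.List.sorted (PySem.Set.ofList (logs.map (fun l => l.2.1))) (fun d => d))).foldl
              (fun (d : PySem.Dict Int Int) (p : Int × Int) => d.insert p.2 (p.1 + 1)) PySem.Dict.empty).getD l.2.1 0).toNat l.2.2)
      (List.replicate ((PySem.List.sorted (PySem.Set.ofList (logs.map (fun l => l.2.1))) (fun d => d)).length + 1) 0)) t 0
    = (logs.map (fun l => if PySem.List.bisectLeft
          (PySem.List.sorted (PySem.Set.ofList (logs.map (fun l => l.2.1))) (fun d => d)) l.2.1 + 1 ≤ t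
        then l.2.2 else 0)).sum := by
  set L := PySem.List.sorted (PySem.Set.ofList (logs.map (fun l => l.2.1))) (fun d => d) with hL
  have hp : L.Pairwise (· < ·) := sorted_lt_of_set _
  have hnd : L.Nodup := hp.nodup
  have hidx : ∀ l ∈ logs, 0 <
      (((PySem.List.enumerate L).foldl (fun (d : PySem.Dict Int Int) (p : Int × Int) => d.insert p.2 (p.1 + 1)) PySem.Dict.empty).getD l.2.1 0).toNat := by
    intro l hl
    have hmem : l.2.1 ∈ L := (mem_sorted_set _ _).mpr (List.mem_map_of_mem hl)
    obtain ⟨k, hk, hkl⟩ := List.mem_iff_getElem.mp hmem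
    rw [← hkl, dmap_getD L hnd k hk]
    omega
  rw [fenBuild L.length _ _ t ht logs _ (by simp) hidx, fenSum_replicate]
  rw [List.map_congr_left (g := fun l => if PySem.List.bisectLeft L l.2.1 + 1 ≤ t then l.2.2 else 0) ?_]
  · simp
  · intro l hl
    have hmem : l.2.1 ∈ L := (mem_sorted_set _ _).mpr (List.mem_map_of_mem hl)
    obtain ⟨k, hk, hkl⟩ := List.mem_iff_getElem.mp hmem
    have h1 : (((PySem.List.enumerate L).foldl (fun (d : PySem.Dict Int Int) (p : Int × Int) => d.insert p.2 (p.1 + 1)) PySem.Dict.empty).getD l.2.1 0).toNat = k + 1 := by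
      rw [← hkl, dmap_getD L hnd k hk]; omega
    have h2 : PySem.List.bisectLeft L l.2.1 = k := by rw [← hkl]; exact bisectLeft_getElem L hp k hk
    simp only [h1, h2]

theorem bside (logs : List (String × Int × Int)) (t : Nat)
    (ht : t ≤ (PySem.List.sorted (PySem.Set.ofList (logs.map (fun l => l.2.1))) (fun d => d)).length) :
    ((PySem.List.sorted (PySem.Set.ofList (logs.map (fun l => l.2.1))) (fun d => d)).foldl
        (fun p d => p ++ [p.getLastD 0 +
          (logs.foldl (fun (d : PySem.Dict Int Int) (l : String × Int × Int) => d.insert l.2.1 (d.getD l.2.1 0 + l.2.2)) PySem.Dict.empty).getD d 0]) [0]).getD t 0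
    = (logs.map (fun l => if PySem.List.bisectLeft
          (PySem.List.sorted (PySem.Set.ofList (logs.map (fun l => l.2.1))) (fun d => d)) l.2.1 + 1 ≤ t
        then l.2.2 else 0)).sum := by
  set L := PySem.List.sorted (PySem.Set.ofList (logs.map (fun l => l.2.1))) (fun d => d) with hL
  have hp : L.Pairwise (· < ·) := sorted_lt_of_set _
  have hnd : L.Nodup := hp.nodup
  have hdates : ∀ l ∈ logs, l.2.1 ∈ L := by
    intro l hl
    exact (mem_sorted_set _ _).mpr (List.mem_map_of_mem hl)
  rw [prefix_getD _ L t ht]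
  rw [List.map_congr_left (g := fun d => (logs.map (fun l => if l.2.1 = d then l.2.2 else 0)).sum) ?_]
  · exact exchange L hp hnd logs hdates t ht
  · intro d _
    rw [costat_getD logs d PySem.Dict.empty]
    simp

theorem pmq_main (logs : List (String × Int × Int)) (queries : List (Int × Int)) :
    process_maintenance_queries logs queries = process_maintenance_queries_alt logs queries := by
  simp only [process_maintenance_queries, process_maintenance_queries_alt]
  apply PySem.List.foldl_congr_mem
  intro acc q _
  set L := PySem.List.sorted (PySem.Set.ofList (logs.map (fun l => l.2.1))) (fun d => d) with hL
  have hp : L.Pairwise (· < ·) := sorted_lt_of_set _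
  have hple : L.Pairwise (· ≤ ·) := hp.imp le_of_lt
  have hri : PySem.List.bisectRight L q.2 ≤ L.length := (PySem.List.bisectRight_spec L q.2 hple).1
  have hli : PySem.List.bisectLeft L q.1 ≤ L.length := (PySem.List.bisectLeft_spec L q.1 hple).1
  have hli' : PySem.List.bisectLeft L q.1 + 1 - 1 ≤ L.length := by omega
  have h1 := aside logs (PySem.List.bisectRight L q.2) (hL ▸ hri)
  have h2 := aside logs (PySem.List.bisectLeft L q.1 + 1 - 1) (hL ▸ hli')
  have h3 := bside logs (PySem.List.bisectRight L q.2) (hL ▸ hri)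
  have h4 := bside logs (PySem.List.bisectLeft L q.1 + 1 - 1) (hL ▸ hli')
  rw [← hL] at h1 h2 h3 h4
  split_ifs
  · rfl
  · rfl
  · rw [h1, h2, h3, h4]

-- ===== VERDICT (by name: the statement is the Claim_ definition above) =====
theorem process_maintenance_queries_spec : Claim_equal_process_maintenance_queries := by
  intro logs queries _
  unfold Spec_process_maintenance_queries
  exact pmq_main logs queries
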